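-- pv_equiv track=rewrite | github.com/copperfield42/naturales | primalidad_test.py | __primalidad_Test_LLT
-- ===== SOURCE A (Python) =====
-- def __primalidad_Test_LLT(p:int) -> bool:
--     """Lucas–Lehmer primality test. Determina si Mp = 2^p − 1 es primo.
--        en.wikipedia.org/wiki/Lucas%E2%80%93Lehmer_primality_test"""
--     if p==2:
--         return True
--     #para los primos impares
--     mersenne = pow(2,p)-1 #M
--     s = 4
--     for x in range( p-2 ):
--         s = pow(s,2,mersenne)-2
--         #Performing the mod M at each iteration ensures
--         #that all intermediate results are at most p bits
--         #(otherwise the number of bits would double each iteration).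
--         #The same strategy is used in modular exponentiation.
--     return s==0
-- ===== SOURCE B (Python) =====
-- def __primalidad_Test_LLT(p:int) -> bool:
--     """Lucas-Lehmer test for Mp = 2^p - 1 via the closed form of the
--     Lucas-Lehmer sequence: s_k = w^(2^k) + w^(-2^k) with w = 2 + sqrt(3).
--     Instead of iterating s -> s^2 - 2, track the pair (a, b) with
--     w^(2^k) = a + b*sqrt(3) (mod Mp) by squaring in Z[sqrt(3)]/Mp, and
--     read off s = a + a (since w * conj(w) = 1, the trace is 2a)."""
--     if p == 2:
--         return True
--     if p < 3:
--         return False  # Mp < 7: A's empty loop leaves the seed 4, i.e. False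
--     M = (1 << p) - 1
--     a, b = 2, 1
--     for _ in range(p - 2):
--         a, b = (a*a + 3*b*b) % M, (2*a*b) % M
--     return (2*a) % M == 0
-- ===== Notes on version B (the rewrite author's own statement) =====
-- stated objective: alternative
-- what changed: Instead of iterating the Lucas-Lehmer recurrence s -> s^2 - 2 mod Mp, B computes the closed form s_k = w^(2^k) + w^(-2^k) with w = 2+sqrt(3): it squares the pair (a,b) representing w^(2^k) = a + b*sqrt(3) in Z[sqrt(3)] mod Mp ((a,b) -> (a^2+3b^2, 2ab)) and tests the trace 2a mod Mp instead of s.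
import Mathlib
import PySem

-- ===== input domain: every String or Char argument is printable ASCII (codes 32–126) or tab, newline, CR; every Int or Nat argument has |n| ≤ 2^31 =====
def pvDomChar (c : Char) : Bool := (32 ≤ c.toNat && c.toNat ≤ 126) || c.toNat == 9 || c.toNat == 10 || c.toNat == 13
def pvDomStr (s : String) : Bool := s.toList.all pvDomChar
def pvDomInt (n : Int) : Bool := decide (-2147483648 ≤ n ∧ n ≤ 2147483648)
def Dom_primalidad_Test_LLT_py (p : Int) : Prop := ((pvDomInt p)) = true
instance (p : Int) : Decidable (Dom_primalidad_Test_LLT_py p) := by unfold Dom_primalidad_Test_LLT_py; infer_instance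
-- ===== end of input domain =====

-- B replaces the Lucas-Lehmer recurrence s -> s^2 - 2 mod Mp by the closed form
-- s_k = w^(2^k) + w^(-2^k), w = 2 + sqrt(3): it squares the pair (a, b) with
-- w^(2^k) = a + b*sqrt(3) in Z[sqrt(3)] mod Mp and tests the trace 2a mod Mp;
-- an alternative algorithm of similar cost, returning A's value for every int p.

-- ===== PORT A =====
def primalidad_Test_LLT_py (p : Int) : Bool :=
  if p = 2 then true
  else
    -- for p < 0 Python builds a float mersenne here; it is never used, since the loop below is empty
    let mersenne : Int := 2 ^ p.toNat - 1
    let s : Int :=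
      (List.range (p - 2).toNat).foldl (fun s _ => PySem.Int.powMod s 2 mersenne - 2) 4
    decide (s = 0)

-- ===== PORT B =====
def primalidad_Test_LLT_py_alt (p : Int) : Bool :=
  if p = 2 then true
  else if p < 3 then false
  else
    let M : Int := 2 ^ p.toNat - 1
    let ab : Int × Int :=
      (List.range (p - 2).toNat).foldl
        (fun ab _ =>
          (PySem.Int.mod (ab.1 * ab.1 + 3 * (ab.2 * ab.2)) M,
           PySem.Int.mod (2 * ab.1 * ab.2) M)) (2, 1)
    decide (PySem.Int.mod (2 * ab.1) M = 0)

-- ===== PRECONDITION & SPEC =====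
def Spec_primalidad_Test_LLT_py (p : Int) (out : Bool) : Prop := out = primalidad_Test_LLT_py_alt p
instance (p : Int) (out : Bool) : Decidable (Spec_primalidad_Test_LLT_py p out) := by unfold Spec_primalidad_Test_LLT_py; infer_instance

-- ===== CLAIM (what is proved, stated in full; the proofs are below) =====
def Claim_equal_primalidad_Test_LLT_py : Prop := ∀ (p : Int), Dom_primalidad_Test_LLT_py p → Spec_primalidad_Test_LLT_py p (primalidad_Test_LLT_py p)

-- ===== LEMMAS AND PROOFS =====

-- one step: A's residue stays in [-2, M-3], keeps being the trace 2a of B's pair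
-- mod M, and B's pair keeps norm a^2 - 3 b^2 ≡ 1 (mod M)
theorem pv_step (M : Int) (hM : 7 ≤ M) (s a b : Int)
    (hsa : s % M = (2 * a) % M)
    (hnorm : (a * a - 3 * (b * b)) % M = 1 % M) :
    -2 ≤ PySem.Int.powMod s 2 M - 2 ∧ PySem.Int.powMod s 2 M - 2 ≤ M - 3 ∧
      (PySem.Int.powMod s 2 M - 2) % M
        = (2 * PySem.Int.mod (a * a + 3 * (b * b)) M) % M ∧
      (PySem.Int.mod (a * a + 3 * (b * b)) M * PySem.Int.mod (a * a + 3 * (b * b)) M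
        - 3 * (PySem.Int.mod (2 * a * b) M * PySem.Int.mod (2 * a * b) M)) % M
        = 1 % M := by
  set s' := PySem.Int.powMod s 2 M - 2 with hs'set
  set a' := PySem.Int.mod (a * a + 3 * (b * b)) M with ha'set
  set b' := PySem.Int.mod (2 * a * b) M with hb'set
  have hMpos : (0 : Int) < M := by omega
  have hpow : PySem.Int.powMod s 2 M = (s * s) % M := by
    show PySem.Int.mod (s ^ 2) M = (s * s) % M
    rw [PySem.Int.mod_eq_emod_of_pos hMpos, pow_two]
  have hq0 : 0 ≤ (s * s) % M := Int.emod_nonneg _ (by omega)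
  have hqM : (s * s) % M < M := Int.emod_lt_of_pos _ hMpos
  have hs'def : s' = (s * s) % M - 2 := by rw [hs'set, hpow]
  have ha'def : a' = (a * a + 3 * (b * b)) % M := by rw [ha'set]; exact PySem.Int.mod_eq_emod_of_pos hMpos
  have hb'def : b' = (2 * a * b) % M := by rw [hb'set]; exact PySem.Int.mod_eq_emod_of_pos hMpos
  have hmm : ∀ x : Int, (x % M) ≡ x [ZMOD M] := fun x => Int.emod_emod_of_dvd x dvd_rfl
  have hsaM : s ≡ 2 * a [ZMOD M] := hsa
  have hnormM : a * a - 3 * (b * b) ≡ 1 [ZMOD M] := hnorm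
  refine ⟨by omega, by omega, ?_, ?_⟩
  · -- trace
    have h1 : s' ≡ s * s - 2 [ZMOD M] := by rw [hs'def]; exact (hmm (s * s)).sub_right 2
    have h2 : s * s - 2 ≡ 2 * a * (2 * a) - 2 [ZMOD M] := (hsaM.mul hsaM).sub_right 2
    have h3 : 2 * a * (2 * a) - 2 ≡ 2 * (a * a + 3 * (b * b)) [ZMOD M] := by
      have hd : 2 * (a * a - 3 * (b * b)) ≡ 2 * 1 [ZMOD M] := hnormM.mul_left 2
      have e1 : 2 * a * (2 * a) - 2
          = 2 * (a * a - 3 * (b * b)) + (2 * (a * a + 3 * (b * b)) - 2) := by ring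
      have e2 : 2 * (a * a + 3 * (b * b))
          = 2 * 1 + (2 * (a * a + 3 * (b * b)) - 2) := by ring
      rw [e1]; conv_rhs => rw [e2]
      exact hd.add_right _
    have h4 : 2 * a' ≡ 2 * (a * a + 3 * (b * b)) [ZMOD M] := by
      rw [ha'def]; exact (hmm _).mul_left 2
    exact (h1.trans (h2.trans h3)).trans h4.symm
  · -- norm
    have hA : a' ≡ a * a + 3 * (b * b) [ZMOD M] := by rw [ha'def]; exact hmm _
    have hB : b' ≡ 2 * a * b [ZMOD M] := by rw [hb'def]; exact hmm _
    have h5 : a' * a' - 3 * (b' * b')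
        ≡ (a * a + 3 * (b * b)) * (a * a + 3 * (b * b))
          - 3 * ((2 * a * b) * (2 * a * b)) [ZMOD M] :=
      (hA.mul hA).sub ((hB.mul hB).mul_left 3)
    have e : (a * a + 3 * (b * b)) * (a * a + 3 * (b * b))
          - 3 * ((2 * a * b) * (2 * a * b))
        = (a * a - 3 * (b * b)) * (a * a - 3 * (b * b)) := by ring
    have h6 : (a * a - 3 * (b * b)) * (a * a - 3 * (b * b)) ≡ 1 * 1 [ZMOD M] :=
      hnormM.mul hnormM
    have h7 : a' * a' - 3 * (b' * b') ≡ 1 [ZMOD M] := by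
      rw [show (1 : Int) = 1 * 1 by ring]
      exact h5.trans (e ▸ h6)
    exact h7

theorem pv_loop (M : Int) (hM : 7 ≤ M) (n : Nat) :
    -2 ≤ (List.range n).foldl (fun s _ => PySem.Int.powMod s 2 M - 2) (4 : Int) ∧
    (List.range n).foldl (fun s _ => PySem.Int.powMod s 2 M - 2) (4 : Int) ≤ M - 3 ∧
    ((List.range n).foldl (fun s _ => PySem.Int.powMod s 2 M - 2) (4 : Int)) % M
      = (2 * ((List.range n).foldl (fun ab _ =>
          (PySem.Int.mod (ab.1 * ab.1 + 3 * (ab.2 * ab.2)) M,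
           PySem.Int.mod (2 * ab.1 * ab.2) M)) ((2 : Int), (1 : Int))).1) % M ∧
    (((List.range n).foldl (fun ab _ =>
          (PySem.Int.mod (ab.1 * ab.1 + 3 * (ab.2 * ab.2)) M,
           PySem.Int.mod (2 * ab.1 * ab.2) M)) ((2 : Int), (1 : Int))).1
       * ((List.range n).foldl (fun ab _ =>
          (PySem.Int.mod (ab.1 * ab.1 + 3 * (ab.2 * ab.2)) M,
           PySem.Int.mod (2 * ab.1 * ab.2) M)) ((2 : Int), (1 : Int))).1
      - 3 * (((List.range n).foldl (fun ab _ =>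
          (PySem.Int.mod (ab.1 * ab.1 + 3 * (ab.2 * ab.2)) M,
           PySem.Int.mod (2 * ab.1 * ab.2) M)) ((2 : Int), (1 : Int))).2
        * ((List.range n).foldl (fun ab _ =>
          (PySem.Int.mod (ab.1 * ab.1 + 3 * (ab.2 * ab.2)) M,
           PySem.Int.mod (2 * ab.1 * ab.2) M)) ((2 : Int), (1 : Int))).2)) % M
      = 1 % M := by
  induction n with
  | zero =>
    refine ⟨by norm_num, by norm_num; omega, by norm_num, by norm_num⟩
  | succ n ih =>
    obtain ⟨ih1, ih2, ih3, ih4⟩ := ih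
    simp only [List.range_succ, List.foldl_append, List.foldl_cons, List.foldl_nil]
    have hstep := pv_step M hM _ _ _ ih3 ih4
    exact hstep

-- ===== VERDICT (by name: the statement is the Claim_ definition above) =====
theorem primalidad_Test_LLT_py_spec : Claim_equal_primalidad_Test_LLT_py := by
  intro p _
  unfold Spec_primalidad_Test_LLT_py primalidad_Test_LLT_py primalidad_Test_LLT_py_alt
  by_cases h2 : p = 2
  · simp [h2]
  · by_cases h3 : p < 3
    · have h0 : (p - 2).toNat = 0 := by omega
      simp [h2, h3, h0]
    · have hpn : 3 ≤ p.toNat := by omega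
      have hM : (7 : Int) ≤ 2 ^ p.toNat - 1 := by
        have h8 : (2 : Int) ^ 3 ≤ 2 ^ p.toNat := pow_le_pow_right₀ (by norm_num) hpn
        norm_num at h8; omega
      obtain ⟨hA1, hA2, hT, _⟩ := pv_loop (2 ^ p.toNat - 1) hM (p - 2).toNat
      rw [if_neg h2, if_neg h2, if_neg h3]
      simp only []
      rw [PySem.Int.mod_eq_emod_of_pos (by omega), ← hT, decide_eq_decide]
      set sA := (List.range (p - 2).toNat).foldl
        (fun s _ => PySem.Int.powMod s 2 (2 ^ p.toNat - 1) - 2) (4 : Int) with hsA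
      constructor
      · intro h; rw [h]; simp
      · intro h
        by_cases hge : 0 ≤ sA
        · rwa [Int.emod_eq_of_lt hge (by omega)] at h
        · exfalso
          have : sA % (2 ^ p.toNat - 1) = sA + (2 ^ p.toNat - 1) := by
            rw [← Int.add_emod_right, Int.emod_eq_of_lt (by omega) (by omega)]
          omega
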